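-- pv_equiv track=rewrite | github.com/jacobandersson86/AoC2024 | day04/ceres_search.py | find_x_shape
-- ===== SOURCE A (Python) =====
-- import itertools
--
-- def get_char(text, pos):
--     x, y = pos
--     if x < 0 or y < 0:
--         return None
--     if y >= len(text) or x >= len(text[0]):
--         return None
--
--     return text[y][x]
--
-- def get_expr(text, mid, ds):
--     dx, dy = ds
--     x, y = mid
--     positions = [(x + dx * (i - 1), y + dy * (i - 1)) for i in range(3)]
--     chars = [get_char(text, pos) for pos in positions]
--     try:
--         expr = ''.join(chars)
--     except TypeError:
--         return None
--     return expr
--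
-- def find_x_shape(text, mid):
--     directions = [(1, 1), (1, -1), (-1, -1), (-1, 1)]
--     directions_offset = [(1, -1), (-1, -1), (-1, 1), (1, 1)]
--     dir_len = len(directions)
--     directions = itertools.cycle(directions)
--     directions_offset = itertools.cycle(directions_offset)
--     sum = 0
--     for _ in range(dir_len):
--         ds = next(directions)
--         ds90 = next(directions_offset)
--
--         expr = get_expr(text, mid, ds)
--         expr90 = get_expr(text, mid, ds90)
--         if expr is None or expr90 is None:
--             continue
--         if expr != 'MAS' or expr90 != 'MAS':
--             continue
--         sum += 1
--
--     return sum
-- ===== SOURCE B (Python) =====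
-- def get_char(text, pos):
--     x, y = pos
--     if x < 0 or y < 0:
--         return None
--     if y >= len(text) or x >= len(text[0]):
--         return None
--
--     return text[y][x]
--
-- def find_x_shape(text, mid):
--     x, y = mid
--     main = [get_char(text, (x - 1, y - 1)), get_char(text, (x, y)), get_char(text, (x + 1, y + 1))]
--     anti = [get_char(text, (x + 1, y - 1)), get_char(text, (x, y)), get_char(text, (x - 1, y + 1))]
--     if None in main or None in anti:
--         return 0
--     ok = ''.join(main) in ('MAS', 'SAM') and ''.join(anti) in ('MAS', 'SAM')
--     return 1 if ok else 0
-- ===== Notes on version B (the rewrite author's own statement) =====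
-- stated objective: simpler
-- what changed: Replaces the 4-iteration itertools.cycle loop over (direction, rotated-direction) pairs with a single read of the two diagonals through get_char, accepting each as 'MAS' or 'SAM'; this is exact because a diagonal can read 'MAS' in at most one of its two directions, so the loop's count never exceeds 1.
import Mathlib
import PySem

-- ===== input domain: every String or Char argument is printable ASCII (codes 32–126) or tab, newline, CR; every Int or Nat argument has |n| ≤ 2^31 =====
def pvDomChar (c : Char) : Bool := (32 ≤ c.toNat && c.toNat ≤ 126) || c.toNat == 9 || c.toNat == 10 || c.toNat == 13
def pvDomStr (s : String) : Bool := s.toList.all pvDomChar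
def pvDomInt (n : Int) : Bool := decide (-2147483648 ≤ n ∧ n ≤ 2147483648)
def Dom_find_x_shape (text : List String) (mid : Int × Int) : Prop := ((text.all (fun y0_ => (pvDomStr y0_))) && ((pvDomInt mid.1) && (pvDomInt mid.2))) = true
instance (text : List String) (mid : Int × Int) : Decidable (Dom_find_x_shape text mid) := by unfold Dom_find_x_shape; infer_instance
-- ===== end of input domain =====

-- B drops the 4-step cycle loop over direction pairs and instead reads the two diagonals once,
-- accepting each as 'MAS' or 'SAM' (objective: simpler).

-- ===== PORT A =====
-- get_char: returns the char at (x, y), none for Python's None.  On ragged rows Python raises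
-- IndexError (y in range, x < len(text[0]) but x ≥ len(text[y])); there pyGet? is none and we
-- return none — those inputs are excluded by Pre_find_x_shape.
def pv_get_char (text : List String) (pos : Int × Int) : Option Char :=
  let x := pos.1; let y := pos.2
  if x < 0 ∨ y < 0 then none
  else if y ≥ (text.length : Int) ∨ x ≥ ((text.headD "").toList.length : Int) then none
  else (PySem.List.pyGet? text y).bind (fun row => PySem.Str.pyGet? row x)

-- get_expr: the three chars along ds; ''.join raises TypeError on a None, caught → None;
-- exact as: some (the char list) iff all three are some.  Strings are carried as List Char.
def pv_get_expr (text : List String) (mid : Int × Int) (ds : Int × Int) : Option (List Char) :=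
  let dx := ds.1; let dy := ds.2; let x := mid.1; let y := mid.2
  let positions := [(x + dx * (-1), y + dy * (-1)), (x, y), (x + dx, y + dy)]  -- i - 1 for i in range(3)
  let chars := positions.map (pv_get_char text)
  if chars.all (·.isSome) then some (chars.filterMap id) else none

-- the itertools.cycle iterators are consumed exactly dir_len = 4 times, i.e. the loop walks the
-- two 4-element lists once, in lockstep
def find_x_shape (text : List String) (mid : Int × Int) : Int :=
  let directions : List (Int × Int) := [(1, 1), (1, -1), (-1, -1), (-1, 1)]
  let directions_offset : List (Int × Int) := [(1, -1), (-1, -1), (-1, 1), (1, 1)]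
  (List.zip directions directions_offset).foldl (fun sum p =>
    let expr := pv_get_expr text mid p.1
    let expr90 := pv_get_expr text mid p.2
    match expr, expr90 with
    | some e, some e90 => if e = "MAS".toList ∧ e90 = "MAS".toList then sum + 1 else sum
    | _, _ => sum) 0

-- ===== PORT B =====
def find_x_shape_alt (text : List String) (mid : Int × Int) : Int :=
  let x := mid.1; let y := mid.2
  let main := [pv_get_char text (x - 1, y - 1), pv_get_char text (x, y), pv_get_char text (x + 1, y + 1)]
  let anti := [pv_get_char text (x + 1, y - 1), pv_get_char text (x, y), pv_get_char text (x - 1, y + 1)]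
  if main.contains none ∨ anti.contains none then 0
  else if (main.filterMap id = "MAS".toList ∨ main.filterMap id = "SAM".toList) ∧
          (anti.filterMap id = "MAS".toList ∨ anti.filterMap id = "SAM".toList) then 1 else 0

-- ===== PRECONDITION & SPEC =====
-- Pre_ excludes exactly the inputs where Python A raises IndexError: a probed point whose row is
-- shorter than row 0 (both programs raise there; the ports return 0 instead).
def Pre_find_x_shape (text : List String) (mid : Int × Int) : Prop :=
  ∀ p ∈ [(mid.1 - 1, mid.2 - 1), (mid.1, mid.2), (mid.1 + 1, mid.2 + 1),
         (mid.1 + 1, mid.2 - 1), (mid.1 - 1, mid.2 + 1)],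
    (0 ≤ p.1 ∧ 0 ≤ p.2 ∧ p.2 < (text.length : Int) ∧ p.1 < ((text.headD "").toList.length : Int)) →
    p.1 < ((text.getD p.2.toNat "").toList.length : Int)
instance (text : List String) (mid : Int × Int) : Decidable (Pre_find_x_shape text mid) := by unfold Pre_find_x_shape; infer_instance
def pvWitness_find_x_shape : List String × (Int × Int) := (["M.S", ".A.", "M.S"], (1, 1))
def Spec_find_x_shape (text : List String) (mid : Int × Int) (out : Int) : Prop := out = find_x_shape_alt text mid
instance (text : List String) (mid : Int × Int) (out : Int) : Decidable (Spec_find_x_shape text mid out) := by unfold Spec_find_x_shape; infer_instance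

-- ===== CLAIM (what is proved, stated in full; the proofs are below) =====
def Claim_equal_find_x_shape : Prop := ∀ (text : List String) (mid : Int × Int), Dom_find_x_shape text mid → Pre_find_x_shape text mid → Spec_find_x_shape text mid (find_x_shape text mid)

-- ===== LEMMAS AND PROOFS =====
-- The ports agree on ALL inputs (both are functions of the same five pv_get_char values);
-- Pre_ is needed only for the ports' faithfulness to the raising Pythons, not for this proof.
theorem ports_agree (text : List String) (mid : Int × Int) :
    find_x_shape text mid = find_x_shape_alt text mid := by
  obtain ⟨x, y⟩ := mid
  simp only [find_x_shape, find_x_shape_alt, pv_get_expr, List.zip, List.zipWith, List.foldl,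
    List.map, List.all, List.filterMap]
  have e1 : x + 1 * -1 = x - 1 := by ring
  have e2 : y + 1 * -1 = y - 1 := by ring
  have e3 : x + -1 * -1 = x + 1 := by ring
  have e4 : y + -1 * -1 = y + 1 := by ring
  have e5 : x + -1 = x - 1 := by ring
  have e6 : y + -1 = y - 1 := by ring
  simp only [e1, e2, e3, e4, e5, e6]
  generalize pv_get_char text (x - 1, y - 1) = m1
  generalize pv_get_char text (x, y) = c
  generalize pv_get_char text (x + 1, y + 1) = m2
  generalize pv_get_char text (x + 1, y - 1) = a1
  generalize pv_get_char text (x - 1, y + 1) = a2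
  rcases m1 with _ | cm1 <;> rcases c with _ | cc <;> rcases m2 with _ | cm2 <;>
    rcases a1 with _ | ca1 <;> rcases a2 with _ | ca2 <;>
    simp only [Option.isSome_some, Option.isSome_none, id, Bool.and_true, Bool.and_false,
      List.contains_cons, List.contains_nil, reduceCtorEq, Bool.or_false, reduceIte] <;>
    first
      | rfl
      | (split_ifs <;> simp_all <;> tauto)

-- ===== VERDICT (by name: the statement is the Claim_ definition above) =====
theorem find_x_shape_spec : Claim_equal_find_x_shape := by
  intro text mid _ _
  unfold Spec_find_x_shape
  exact ports_agree text mid
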